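-- pv_equiv track=rewrite | github.com/chosaihim/jungle_git | codingTest/dp/NumberSolitaire(codility).py | solution
-- ===== SOURCE A (Python) =====
-- def solution(A):
--
--     dp = [A[0]]*len(A)
--
--     for i in range(1,len(A)):
--         dp[i] = dp[i-1]+A[i]
--         for sub in range(2,7):
--             if i-sub < 0:
--                 break
--             dp[i] = max(dp[i],dp[i-sub]+A[i])
--
--     return dp[-1]
-- ===== SOURCE B (Python) =====
-- def solution(A):
--     # Monotonic deque of (index, dp-value) pairs, dp values strictly decreasing
--     # front->back; the front always holds the max dp of the window [i-6, i-1].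
--     dq = [(0, A[0])]
--     best = A[0]
--     for i in range(1, len(A)):
--         while dq and dq[0][0] < i - 6:
--             dq.pop(0)
--         v = A[i] + dq[0][1]
--         while dq and dq[-1][1] <= v:
--             dq.pop()
--         dq.append((i, v))
--         best = v
--     return best
-- ===== Notes on version B (the rewrite author's own statement) =====
-- stated objective: faster
-- what changed: Replaces the dp array and the inner 6-iteration max scan with break by a monotonic deque of (index, dp-value) pairs: fronts outside the window [i-6,i-1] are expired, dp[i] is read off the deque front, and smaller-or-equal backs are popped before pushing, so the window max is maintained amortized O(1) with no dp list.
import Mathlib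
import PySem

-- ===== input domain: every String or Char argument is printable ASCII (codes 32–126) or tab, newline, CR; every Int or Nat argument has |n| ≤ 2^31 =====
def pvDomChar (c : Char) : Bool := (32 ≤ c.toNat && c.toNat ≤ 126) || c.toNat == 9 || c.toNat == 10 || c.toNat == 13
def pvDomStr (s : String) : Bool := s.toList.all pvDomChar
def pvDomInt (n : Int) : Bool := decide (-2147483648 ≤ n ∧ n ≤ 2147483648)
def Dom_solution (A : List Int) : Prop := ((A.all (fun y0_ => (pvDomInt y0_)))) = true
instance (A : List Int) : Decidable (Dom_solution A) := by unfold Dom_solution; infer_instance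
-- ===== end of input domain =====

-- B drops the dp array and the inner 6-step max scan: a monotonic deque of (index, dp)
-- pairs delivers each window max from its front (alternative decomposition, O(1) space).

-- ===== PORT A =====
-- inner 'for sub in range(2,7)' loop with its break
def solInnerA (dp A : List Int) (i : Int) : List Int → Int → Int
  | [], dpi => dpi
  | sub :: rest, dpi =>
    if i - sub < 0 then dpi
    else solInnerA dp A i rest (max dpi (PySem.List.pyGetD dp (i - sub) 0 + PySem.List.pyGetD A i 0))

def solution (A : List Int) : Int :=
  let dp := List.replicate A.length (PySem.List.pyGetD A 0 0)
  let dp := (PySem.List.pyRange 1 (A.length) 1).foldl (fun dp i =>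
      let v := PySem.List.pyGetD dp (i - 1) 0 + PySem.List.pyGetD A i 0
      let v := solInnerA dp A i [2, 3, 4, 5, 6] v
      PySem.List.pySetD dp i v) dp
  PySem.List.pyGetD dp (-1) 0

-- ===== PORT B =====
-- 'while dq and dq[0][0] < i - 6: dq.pop(0)'
def popFrontB (lim : Int) : List (Int × Int) → List (Int × Int)
  | [] => []
  | p :: rest => if p.1 < lim then popFrontB lim rest else p :: rest

-- 'while dq and dq[-1][1] <= v: dq.pop()' — Python pops from the back; ported on the
-- reversed list (the caller reverses before and after), dropping heads with value ≤ v.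
def popBackB (v : Int) : List (Int × Int) → List (Int × Int)
  | [] => []
  | p :: rest => if p.2 ≤ v then popBackB v rest else p :: rest

def solution_alt (A : List Int) : Int :=
  let a0 := PySem.List.pyGetD A 0 0
  let st := (PySem.List.pyRange 1 (A.length) 1).foldl
    (fun (st : List (Int × Int) × Int) i =>
      let dq := popFrontB (i - 6) st.1
      -- dq[0][1]: the deque is never empty here (the newest index i-1 never expires)
      let v := PySem.List.pyGetD A i 0 + ((dq.head?.map Prod.snd).getD 0)
      let dq := (popBackB v dq.reverse).reverse ++ [(i, v)]
      (dq, v)) ([(0, a0)], a0)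
  st.2

-- ===== PRECONDITION & SPEC =====
-- Python A raises IndexError on the empty list (it reads the first element up front); Pre_ excludes exactly that input.
def Pre_solution (A : List Int) : Prop := A ≠ []
instance (A : List Int) : Decidable (Pre_solution A) := by unfold Pre_solution; infer_instance
def pvWitness_solution : List Int := [1, -2, 0, 9, -1, -2, 3]
def Spec_solution (A : List Int) (out : Int) : Prop := out = solution_alt A
instance (A : List Int) (out : Int) : Decidable (Spec_solution A out) := by unfold Spec_solution; infer_instance

-- ===== CLAIM (what is proved, stated in full; the proofs are below) =====
def Claim_equal_solution : Prop := ∀ (A : List Int), Dom_solution A → Pre_solution A → Spec_solution A (solution A)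

-- ===== LEMMAS AND PROOFS =====

-- max of the (≤6)-element window at the head of the reversed dp list
def maxW : List Int → Int
  | [] => 0
  | h :: s => (s.take 5).foldl max h

-- reference: reversed dp list, newest first
def stepRef (R : List Int) (x : Int) : List Int := (x + maxW R) :: R

-- length of the reference fold
lemma length_refFold (r : List Int) (t : List Int) :
    (List.foldl stepRef r t).length = r.length + t.length := by
  induction t generalizing r with
  | nil => simp
  | cons x u ih => simp [List.foldl, stepRef, ih]; omega

lemma refFold_ne_nil (r t : List Int) (h : r ≠ []) : List.foldl stepRef r t ≠ [] := by
  have := length_refFold r t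
  intro hc
  rw [hc] at this
  simp at this
  rcases r with _ | _
  · simp_all
  · simp_all; omega

-- reading a cell of the dp array (reversed reference ++ untouched padding)
lemma dp_read (h : Int) (s pad : List Int) (sub : Int) (h1 : 1 ≤ sub)
    (h2 : sub ≤ (s.length : Int) + 1) :
    PySem.List.pyGetD ((h :: s).reverse ++ pad) ((s.length : Int) + 1 - sub) 0
      = (h :: s).getD (sub - 1).toNat 0 := by
  have hj : (s.length : Int) + 1 - sub = ((s.length + 1 - sub.toNat : Nat) : Int) := by omega
  rw [hj, PySem.List.pyGetD_natCast]
  rw [List.getD_append _ _ _ _ (by simp; omega)]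
  rw [List.getD_eq_getElem?_getD, List.getElem?_reverse (by simp; omega)]
  rw [← List.getD_eq_getElem?_getD]
  congr 1
  simp
  omega

-- the inner break-loop computes the window max
lemma inner_spec (A dp : List Int) (h x : Int) (s pad : List Int)
    (hdp : dp = (h :: s).reverse ++ pad)
    (hA : PySem.List.pyGetD A ((s.length : Int) + 1) 0 = x) :
    solInnerA dp A ((s.length : Int) + 1) [2, 3, 4, 5, 6] (h + x) = maxW (h :: s) + x := by
  subst hdp
  rcases s with _ | ⟨b1, _ | ⟨b2, _ | ⟨b3, _ | ⟨b4, _ | ⟨b5, srest⟩⟩⟩⟩⟩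
  · have hc : ∀ k : Int, k ≤ (((([] : List Int)).length : Int) + 1) → ¬(((([] : List Int)).length : Int) + 1 - k < 0) := by
      intro k hk; omega
    have hs : ∀ k : Int, 1 ≤ k → k ≤ (((([] : List Int)).length : Int) + 1) → k ≤ ((([] : List Int)).length : Int) + 1 := fun k _ hk => hk
    have hlen : ((([] : List Int)).length : Int) = 0 := by norm_num
    simp only [solInnerA, hA]
    have hp : (((([] : List Int)).length : Int) + 1 - 2 < 0) := by rw [hlen]; try omega
    rw [if_pos hp]
    norm_num [List.getD, maxW, show Int.toNat 1 = 1 from rfl, show Int.toNat 2 = 2 from rfl, show Int.toNat 3 = 3 from rfl, show Int.toNat 4 = 4 from rfl, show Int.toNat 5 = 5 from rfl]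
  · have hc : ∀ k : Int, k ≤ (((b1 :: ([] : List Int)).length : Int) + 1) → ¬(((b1 :: ([] : List Int)).length : Int) + 1 - k < 0) := by
      intro k hk; omega
    have hs : ∀ k : Int, 1 ≤ k → k ≤ (((b1 :: ([] : List Int)).length : Int) + 1) → k ≤ ((b1 :: ([] : List Int)).length : Int) + 1 := fun k _ hk => hk
    have hlen : ((b1 :: ([] : List Int)).length : Int) = 1 := by simp only [List.length_cons, List.length_nil]; push_cast; try omega
    simp only [solInnerA, hA]
    rw [if_neg (hc 2 (by rw [hlen]; try omega)), dp_read h _ pad 2 (by norm_num) (hs 2 (by norm_num) (by rw [hlen]; try omega))]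
    have hp : (((b1 :: ([] : List Int)).length : Int) + 1 - 3 < 0) := by rw [hlen]; try omega
    rw [if_pos hp]
    norm_num [List.getD, maxW, show Int.toNat 1 = 1 from rfl, show Int.toNat 2 = 2 from rfl, show Int.toNat 3 = 3 from rfl, show Int.toNat 4 = 4 from rfl, show Int.toNat 5 = 5 from rfl]
  · have hc : ∀ k : Int, k ≤ (((b1 :: b2 :: ([] : List Int)).length : Int) + 1) → ¬(((b1 :: b2 :: ([] : List Int)).length : Int) + 1 - k < 0) := by
      intro k hk; omega
    have hs : ∀ k : Int, 1 ≤ k → k ≤ (((b1 :: b2 :: ([] : List Int)).length : Int) + 1) → k ≤ ((b1 :: b2 :: ([] : List Int)).length : Int) + 1 := fun k _ hk => hk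
    have hlen : ((b1 :: b2 :: ([] : List Int)).length : Int) = 2 := by simp only [List.length_cons, List.length_nil]; push_cast; try omega
    simp only [solInnerA, hA]
    rw [if_neg (hc 2 (by rw [hlen]; try omega)), dp_read h _ pad 2 (by norm_num) (hs 2 (by norm_num) (by rw [hlen]; try omega))]
    rw [if_neg (hc 3 (by rw [hlen]; try omega)), dp_read h _ pad 3 (by norm_num) (hs 3 (by norm_num) (by rw [hlen]; try omega))]
    have hp : (((b1 :: b2 :: ([] : List Int)).length : Int) + 1 - 4 < 0) := by rw [hlen]; try omega
    rw [if_pos hp]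
    norm_num [List.getD, maxW, show Int.toNat 1 = 1 from rfl, show Int.toNat 2 = 2 from rfl, show Int.toNat 3 = 3 from rfl, show Int.toNat 4 = 4 from rfl, show Int.toNat 5 = 5 from rfl]
  · have hc : ∀ k : Int, k ≤ (((b1 :: b2 :: b3 :: ([] : List Int)).length : Int) + 1) → ¬(((b1 :: b2 :: b3 :: ([] : List Int)).length : Int) + 1 - k < 0) := by
      intro k hk; omega
    have hs : ∀ k : Int, 1 ≤ k → k ≤ (((b1 :: b2 :: b3 :: ([] : List Int)).length : Int) + 1) → k ≤ ((b1 :: b2 :: b3 :: ([] : List Int)).length : Int) + 1 := fun k _ hk => hk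
    have hlen : ((b1 :: b2 :: b3 :: ([] : List Int)).length : Int) = 3 := by simp only [List.length_cons, List.length_nil]; push_cast; try omega
    simp only [solInnerA, hA]
    rw [if_neg (hc 2 (by rw [hlen]; try omega)), dp_read h _ pad 2 (by norm_num) (hs 2 (by norm_num) (by rw [hlen]; try omega))]
    rw [if_neg (hc 3 (by rw [hlen]; try omega)), dp_read h _ pad 3 (by norm_num) (hs 3 (by norm_num) (by rw [hlen]; try omega))]
    rw [if_neg (hc 4 (by rw [hlen]; try omega)), dp_read h _ pad 4 (by norm_num) (hs 4 (by norm_num) (by rw [hlen]; try omega))]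
    have hp : (((b1 :: b2 :: b3 :: ([] : List Int)).length : Int) + 1 - 5 < 0) := by rw [hlen]; try omega
    rw [if_pos hp]
    norm_num [List.getD, maxW, show Int.toNat 1 = 1 from rfl, show Int.toNat 2 = 2 from rfl, show Int.toNat 3 = 3 from rfl, show Int.toNat 4 = 4 from rfl, show Int.toNat 5 = 5 from rfl]
  · have hc : ∀ k : Int, k ≤ (((b1 :: b2 :: b3 :: b4 :: ([] : List Int)).length : Int) + 1) → ¬(((b1 :: b2 :: b3 :: b4 :: ([] : List Int)).length : Int) + 1 - k < 0) := by
      intro k hk; omega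
    have hs : ∀ k : Int, 1 ≤ k → k ≤ (((b1 :: b2 :: b3 :: b4 :: ([] : List Int)).length : Int) + 1) → k ≤ ((b1 :: b2 :: b3 :: b4 :: ([] : List Int)).length : Int) + 1 := fun k _ hk => hk
    have hlen : ((b1 :: b2 :: b3 :: b4 :: ([] : List Int)).length : Int) = 4 := by simp only [List.length_cons, List.length_nil]; push_cast; try omega
    simp only [solInnerA, hA]
    rw [if_neg (hc 2 (by rw [hlen]; try omega)), dp_read h _ pad 2 (by norm_num) (hs 2 (by norm_num) (by rw [hlen]; try omega))]
    rw [if_neg (hc 3 (by rw [hlen]; try omega)), dp_read h _ pad 3 (by norm_num) (hs 3 (by norm_num) (by rw [hlen]; try omega))]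
    rw [if_neg (hc 4 (by rw [hlen]; try omega)), dp_read h _ pad 4 (by norm_num) (hs 4 (by norm_num) (by rw [hlen]; try omega))]
    rw [if_neg (hc 5 (by rw [hlen]; try omega)), dp_read h _ pad 5 (by norm_num) (hs 5 (by norm_num) (by rw [hlen]; try omega))]
    have hp : (((b1 :: b2 :: b3 :: b4 :: ([] : List Int)).length : Int) + 1 - 6 < 0) := by rw [hlen]; try omega
    rw [if_pos hp]
    norm_num [List.getD, maxW, show Int.toNat 1 = 1 from rfl, show Int.toNat 2 = 2 from rfl, show Int.toNat 3 = 3 from rfl, show Int.toNat 4 = 4 from rfl, show Int.toNat 5 = 5 from rfl]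
  · have hc : ∀ k : Int, k ≤ (((b1 :: b2 :: b3 :: b4 :: b5 :: srest).length : Int) + 1) → ¬(((b1 :: b2 :: b3 :: b4 :: b5 :: srest).length : Int) + 1 - k < 0) := by
      intro k hk; omega
    have hs : ∀ k : Int, 1 ≤ k → k ≤ (((b1 :: b2 :: b3 :: b4 :: b5 :: srest).length : Int) + 1) → k ≤ ((b1 :: b2 :: b3 :: b4 :: b5 :: srest).length : Int) + 1 := fun k _ hk => hk
    have hlen : ((b1 :: b2 :: b3 :: b4 :: b5 :: srest).length : Int) = (srest.length : Int) + 5 := by simp only [List.length_cons]; push_cast; try omega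
    simp only [solInnerA, hA]
    rw [if_neg (hc 2 (by rw [hlen]; try omega)), dp_read h _ pad 2 (by norm_num) (hs 2 (by norm_num) (by rw [hlen]; try omega))]
    rw [if_neg (hc 3 (by rw [hlen]; try omega)), dp_read h _ pad 3 (by norm_num) (hs 3 (by norm_num) (by rw [hlen]; try omega))]
    rw [if_neg (hc 4 (by rw [hlen]; try omega)), dp_read h _ pad 4 (by norm_num) (hs 4 (by norm_num) (by rw [hlen]; try omega))]
    rw [if_neg (hc 5 (by rw [hlen]; try omega)), dp_read h _ pad 5 (by norm_num) (hs 5 (by norm_num) (by rw [hlen]; try omega))]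
    rw [if_neg (hc 6 (by rw [hlen]; try omega)), dp_read h _ pad 6 (by norm_num) (hs 6 (by norm_num) (by rw [hlen]; try omega))]
    norm_num [List.getD, maxW, show Int.toNat 1 = 1 from rfl, show Int.toNat 2 = 2 from rfl, show Int.toNat 3 = 3 from rfl, show Int.toNat 4 = 4 from rfl, show Int.toNat 5 = 5 from rfl]

-- loop invariant for A's forward pass
lemma A_inv (a0 : Int) (t : List Int) : ∀ (u done R : List Int),
    t = done ++ u →
    R = List.foldl stepRef [a0] done →
    List.foldl (fun dp i =>
        PySem.List.pySetD dp i (solInnerA dp (a0 :: t) i [2, 3, 4, 5, 6]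
          (PySem.List.pyGetD dp (i - 1) 0 + PySem.List.pyGetD (a0 :: t) i 0)))
      (R.reverse ++ List.replicate u.length a0)
      (PySem.List.pyRange ((done.length : Int) + 1) ((t.length : Int) + 1) 1)
    = (List.foldl stepRef [a0] t).reverse := by
  intro u
  induction u with
  | nil =>
    intro done R ht hR
    have hd : done = t := by simpa using ht.symm
    subst hd
    rw [PySem.List.pyRange_one_eq_nil (by omega)]
    simp [hR]
  | cons x v ih =>
    intro done R ht hR
    have hlen : R.length = done.length + 1 := by
      rw [hR, length_refFold]; simp; try omega
    obtain ⟨h, s, rfl⟩ : ∃ h s, R = h :: s := by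
      cases R with
      | nil => simp at hlen
      | cons a b => exact ⟨a, b, rfl⟩
    have hslen : s.length = done.length := by simpa using hlen
    have hlt : ((done.length : Int) + 1) < (t.length : Int) + 1 := by
      subst ht; simp; try omega
    rw [PySem.List.pyRange_one_cons hlt, List.foldl_cons]
    have hi : ((done.length : Int) + 1) = ((s.length : Int) + 1) := by rw [hslen]
    rw [hi]
    have hAx : PySem.List.pyGetD (a0 :: t) (((s.length : Int)) + 1) 0 = x := by
      have e1 : ((s.length : Int) + 1) = (((a0 :: done).length : Nat) : Int) := by
        simp [hslen]
      have e2 : a0 :: t = (a0 :: done) ++ x :: v := by rw [ht]; rfl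
      rw [e1, e2, PySem.List.pyGetD_natCast]
      simp [List.getD_eq_getElem?_getD]
    have hread1 : PySem.List.pyGetD ((h :: s).reverse ++ List.replicate (x :: v).length a0)
        (((s.length : Int)) + 1 - 1) 0 = h := by
      rw [dp_read h s _ 1 (by norm_num) (by omega)]
      rfl
    have hinner := inner_spec (a0 :: t) ((h :: s).reverse ++ List.replicate (x :: v).length a0)
        h x s (List.replicate (x :: v).length a0) rfl hAx
    simp only [hread1, hAx, hinner]
    have hset : PySem.List.pySetD ((h :: s).reverse ++ List.replicate (x :: v).length a0)
        ((s.length : Int) + 1) (maxW (h :: s) + x)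
        = ((x + maxW (h :: s)) :: h :: s).reverse ++ List.replicate v.length a0 := by
      have e1 : ((s.length : Int) + 1) = (((s.length + 1 : Nat)) : Int) := by push_cast; ring
      rw [e1, PySem.List.pySetD_natCast]
      have e2 : (x :: v).length = v.length + 1 := rfl
      rw [e2]
      have e3 : s.length + 1 = ((h :: s).reverse).length := by simp
      rw [e3, List.set_append_right _ _ (le_refl _)]
      simp [List.replicate_succ, add_comm]
    rw [hset]
    have := ih (done ++ [x]) ((x + maxW (h :: s)) :: h :: s)
      (by rw [ht]; simp)
      (by rw [List.foldl_append, ← hR]; rfl)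
    have estart : ((s.length : Int) + 1 + 1) = (((done ++ [x]).length : Int) + 1) := by
      simp [hslen]
    rw [estart]
    exact this

-- ========== B-side reference machinery ==========

-- annotate a (newest-first) window with indices: position p of a list whose newest
-- element has index n-1 gets index n-1-p
def annot : Int → List Int → List (Int × Int)
  | _, [] => []
  | n, a :: s => (n - 1, a) :: annot (n - 1) s

-- strict rising maxima, scanning newest→oldest, above threshold m
def riseFrom (m : Int) : List (Int × Int) → List (Int × Int)
  | [] => []
  | p :: rest => if m < p.2 then p :: riseFrom p.2 rest else riseFrom m rest

def rise : List (Int × Int) → List (Int × Int)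
  | [] => []
  | p :: rest => p :: riseFrom p.2 rest

-- the reference deque for a reversed dp list R (covers indices down to |R|-7)
def dqRef (R : List Int) : List (Int × Int) :=
  (rise (annot (R.length : Int) (R.take 7))).reverse

-- fold of max over the values of an annotated list
def fmax (m : Int) (l : List (Int × Int)) : Int := l.foldl (fun a q => max a q.2) m

-- value of the last element, default d
def lastVal (d : Int) : List (Int × Int) → Int
  | [] => d
  | p :: rest => lastVal p.2 rest

lemma annot_append (n : Int) (l1 l2 : List Int) :
    annot n (l1 ++ l2) = annot n l1 ++ annot (n - l1.length) l2 := by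
  induction l1 generalizing n with
  | nil => simp [annot]
  | cons a s ih =>
    simp only [List.cons_append, annot, ih, List.length_cons]
    have e : n - 1 - (s.length : Int) = n - ((s.length + 1 : Nat) : Int) := by push_cast; ring
    rw [e]

lemma mem_annot_idx_ge (n : Int) (l : List Int) (q : Int × Int) (hq : q ∈ annot n l) :
    n - l.length ≤ q.1 := by
  induction l generalizing n with
  | nil => simp [annot] at hq
  | cons a s ih =>
    simp only [annot, List.mem_cons] at hq
    rcases hq with rfl | hq
    · show n - ((a :: s).length : Int) ≤ n - 1
      simp only [List.length_cons]
      omega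
    · have := ih (n - 1) hq
      simp only [List.length_cons]
      omega

lemma mem_riseFrom (m : Int) (l : List (Int × Int)) (q : Int × Int)
    (hq : q ∈ riseFrom m l) : q ∈ l := by
  induction l generalizing m with
  | nil => simp [riseFrom] at hq
  | cons p rest ih =>
    simp only [riseFrom] at hq
    split_ifs at hq with hc
    · rcases List.mem_cons.mp hq with rfl | hq
      · exact List.mem_cons_self
      · exact List.mem_cons_of_mem _ (ih _ hq)
    · exact List.mem_cons_of_mem _ (ih _ hq)

lemma mem_rise (l : List (Int × Int)) (q : Int × Int) (hq : q ∈ rise l) : q ∈ l := by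
  cases l with
  | nil => simp [rise] at hq
  | cons p rest =>
    rcases List.mem_cons.mp hq with rfl | hq
    · exact List.mem_cons_self
    · exact List.mem_cons_of_mem _ (mem_riseFrom _ _ _ hq)

lemma riseFrom_append_singleton (l : List (Int × Int)) (q : Int × Int) : ∀ m,
    riseFrom m (l ++ [q]) = riseFrom m l ++ (if fmax m l < q.2 then [q] else []) := by
  induction l with
  | nil => intro m; simp [riseFrom, fmax]
  | cons p rest ih =>
    intro m
    simp only [List.cons_append, riseFrom]
    by_cases hc : m < p.2
    · rw [if_pos hc, if_pos hc, ih p.2, List.cons_append]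
      have : fmax m (p :: rest) = fmax p.2 rest := by
        simp [fmax]; congr 1; omega
      rw [this]
    · rw [if_neg hc, if_neg hc, ih m]
      have : fmax m (p :: rest) = fmax m rest := by
        simp [fmax]; congr 1; omega
      rw [this]

lemma popBackB_popBackB (k m : Int) (hkm : k ≤ m) (l : List (Int × Int)) :
    popBackB m (popBackB k l) = popBackB m l := by
  induction l with
  | nil => rfl
  | cons p rest ih =>
    simp only [popBackB]
    by_cases hc : p.2 ≤ k
    · rw [if_pos hc, if_pos (le_trans hc hkm), ih]
    · rw [if_neg hc]
      simp only [popBackB]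

lemma riseFrom_eq_popBackB (l : List (Int × Int)) : ∀ m,
    riseFrom m l = popBackB m (rise l) := by
  induction l with
  | nil => intro m; rfl
  | cons p rest ih =>
    intro m
    simp only [riseFrom, rise, popBackB]
    by_cases hc : m < p.2
    · rw [if_pos hc, if_neg (by omega)]
    · rw [if_neg hc, if_pos (by omega), ih m, ih p.2,
        popBackB_popBackB p.2 m (by omega)]

lemma lastVal_riseFrom (l : List (Int × Int)) : ∀ m,
    lastVal m (riseFrom m l) = fmax m l := by
  induction l with
  | nil => intro m; rfl
  | cons p rest ih =>
    intro m
    simp only [riseFrom]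
    by_cases hc : m < p.2
    · rw [if_pos hc]
      have : fmax m (p :: rest) = fmax p.2 rest := by
        simp [fmax]; congr 1; omega
      rw [this, lastVal, ih p.2]
    · rw [if_neg hc]
      have : fmax m (p :: rest) = fmax m rest := by
        simp [fmax]; congr 1; omega
      rw [this, ih m]

lemma getLast_eq_lastVal (l : List (Int × Int)) : ∀ (p : Int × Int),
    ((p :: l).getLast (List.cons_ne_nil _ _)).2 = lastVal p.2 l := by
  induction l with
  | nil => intro p; rfl
  | cons q rest ih =>
    intro p
    rw [List.getLast_cons (List.cons_ne_nil _ _), ih q]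
    rfl

lemma fmax_annot (l : List Int) : ∀ (n m : Int),
    fmax m (annot n l) = List.foldl max m l := by
  induction l with
  | nil => intro n m; rfl
  | cons a s ih =>
    intro n m
    simp only [annot, fmax, List.foldl_cons]
    exact ih (n - 1) (max m a)

-- reverse of a nonempty list as getLast :: …
lemma reverse_eq_getLast_cons (l : List (Int × Int)) (h : l ≠ []) :
    l.reverse = l.getLast h :: l.dropLast.reverse := by
  conv_lhs => rw [← List.dropLast_append_getLast h]
  simp

lemma rise_ne_nil (p : Int × Int) (rest : List (Int × Int)) : rise (p :: rest) ≠ [] := by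
  simp [rise]

lemma rise_append_singleton (p : Int × Int) (rest : List (Int × Int)) (q : Int × Int) :
    rise ((p :: rest) ++ [q])
      = rise (p :: rest) ++ (if fmax p.2 rest < q.2 then [q] else []) := by
  simp only [List.cons_append, rise, riseFrom_append_singleton]

-- front expiry: trimming dqRef R at limit |R|-6 leaves exactly the 6-window deque
lemma pop_front_eq (h : Int) (s : List Int) :
    popFrontB (((h :: s).length : Int) - 6) (dqRef (h :: s))
      = (rise (annot ((h :: s).length : Int) ((h :: s).take 6))).reverse := by
  have hls : (((h :: s).length : Int)) = (s.length : Int) + 1 := by simp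
  have hw6 : annot (((h :: s).length : Int)) ((h :: s).take 6)
      = ((((h :: s).length : Int)) - 1, h) :: annot ((((h :: s).length : Int)) - 1) (s.take 5) := by
    simp [annot]
  have hne : rise (annot (((h :: s).length : Int)) ((h :: s).take 6)) ≠ [] := by
    rw [hw6]; exact rise_ne_nil _ _
  have hidx : ∀ q ∈ rise (annot (((h :: s).length : Int)) ((h :: s).take 6)),
      (((h :: s).length : Int)) - 6 ≤ q.1 := by
    intro q hq
    have h1 := mem_annot_idx_ge _ _ q (mem_rise _ _ hq)
    have h2 : ((((h :: s).take 6).length : Int)) ≤ 6 := by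
      have := List.length_take_le 6 (h :: s)
      omega
    omega
  have hstop : popFrontB ((((h :: s).length : Int)) - 6)
        ((rise (annot (((h :: s).length : Int)) ((h :: s).take 6))).reverse)
      = (rise (annot (((h :: s).length : Int)) ((h :: s).take 6))).reverse := by
    rw [reverse_eq_getLast_cons _ hne, popFrontB,
      if_neg (by
        have := hidx _ (List.getLast_mem hne)
        omega)]
  by_cases hlen : (h :: s).length ≤ 6
  · have h7 : (h :: s).take 7 = (h :: s).take 6 := by
      rw [List.take_of_length_le hlen, List.take_of_length_le (by omega)]
    rw [dqRef, h7, hstop]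
  · -- length ≥ 7: take 7 = take 6 ++ [e] with index |R| - 7
    obtain ⟨e, rest, hdrop⟩ : ∃ e rest, (h :: s).drop 6 = e :: rest := by
      rcases hd : (h :: s).drop 6 with _ | ⟨e, rest⟩
      · exfalso
        have := congrArg List.length hd
        simp at this
        omega
      · exact ⟨e, rest, rfl⟩
    have h7 : (h :: s).take 7 = (h :: s).take 6 ++ [e] := by
      have h76 : (7 : Nat) = 6 + 1 := rfl
      rw [h76, List.take_add, hdrop]
      rfl
    have hlen6 : ((((h :: s).take 6).length : Int)) = 6 := by
      simp only [List.length_take, List.length_cons]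
      have : ¬ s.length + 1 ≤ 6 := by simpa using hlen
      omega
    have hw7 : annot (((h :: s).length : Int)) ((h :: s).take 7)
        = annot (((h :: s).length : Int)) ((h :: s).take 6)
          ++ [((((h :: s).length : Int)) - 7, e)] := by
      rw [h7, annot_append, hlen6]
      simp [annot]
      omega
    rw [dqRef, hw7, hw6, rise_append_singleton, ← hw6]
    split_ifs with hkeep
    · rw [List.reverse_append]
      simp only [List.reverse_cons, List.reverse_nil, List.nil_append, List.singleton_append]
      rw [popFrontB]
      rw [if_pos (by omega)]
      exact hstop
    · simp only [List.append_nil]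
      exact hstop

-- the front of the trimmed deque carries the window max
lemma front_max (h : Int) (s : List Int) (n : Int) :
    ((((rise (annot n ((h :: s).take 6))).reverse).head?.map Prod.snd).getD 0)
      = maxW (h :: s) := by
  have hw6 : annot n ((h :: s).take 6) = (n - 1, h) :: annot (n - 1) (s.take 5) := by
    simp [annot]
  rw [hw6]
  simp only [rise]
  rw [reverse_eq_getLast_cons _ (List.cons_ne_nil _ _)]
  simp only [List.head?_cons, Option.map_some, Option.getD_some]
  rw [getLast_eq_lastVal]
  simp only
  rw [lastVal_riseFrom, fmax_annot]
  rfl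

-- one step of B's loop, from the reference deque
lemma bstep_eq (R : List Int) (hR : R ≠ []) (x : Int) :
    ((popBackB
        (x + ((Option.map Prod.snd (popFrontB ((R.length : Int) - 6) (dqRef R)).head?).getD 0))
        (popFrontB ((R.length : Int) - 6) (dqRef R)).reverse).reverse
      ++ [((R.length : Int),
            x + ((Option.map Prod.snd (popFrontB ((R.length : Int) - 6) (dqRef R)).head?).getD 0))],
      x + ((Option.map Prod.snd (popFrontB ((R.length : Int) - 6) (dqRef R)).head?).getD 0))
    = (dqRef (stepRef R x), (stepRef R x).headI) := by
  obtain ⟨h, s, rfl⟩ : ∃ h s, R = h :: s := by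
    cases R with
    | nil => exact absurd rfl hR
    | cons a b => exact ⟨a, b, rfl⟩
  rw [pop_front_eq, List.reverse_reverse, front_max, ← riseFrom_eq_popBackB]
  have hstep : stepRef (h :: s) x = (x + maxW (h :: s)) :: h :: s := rfl
  have hnew : dqRef (stepRef (h :: s) x)
      = ((((h :: s).length : Int), x + maxW (h :: s))
          :: riseFrom (x + maxW (h :: s))
              (annot ((h :: s).length : Int) ((h :: s).take 6))).reverse := by
    rw [dqRef, hstep]
    have h1 : ((x + maxW (h :: s)) :: h :: s).take 7 = (x + maxW (h :: s)) :: (h :: s).take 6 := by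
      rfl
    rw [h1]
    have h2 : ((((x + maxW (h :: s)) :: h :: s).length : Int)) = ((h :: s).length : Int) + 1 := by
      simp
    rw [h2]
    simp only [annot, rise]
    norm_num
  rw [hnew, hstep]
  simp

-- loop invariant for B's deque pass
lemma B_inv (a0 : Int) (t : List Int) : ∀ (u done R : List Int),
    t = done ++ u →
    R = List.foldl stepRef [a0] done →
    List.foldl (fun (st : List (Int × Int) × Int) i =>
        ((popBackB
            (PySem.List.pyGetD (a0 :: t) i 0
              + ((Option.map Prod.snd (popFrontB (i - 6) st.1).head?).getD 0))
            (popFrontB (i - 6) st.1).reverse).reverse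
          ++ [(i, PySem.List.pyGetD (a0 :: t) i 0
              + ((Option.map Prod.snd (popFrontB (i - 6) st.1).head?).getD 0))],
          PySem.List.pyGetD (a0 :: t) i 0
            + ((Option.map Prod.snd (popFrontB (i - 6) st.1).head?).getD 0)))
      (dqRef R, R.headI)
      (PySem.List.pyRange ((done.length : Int) + 1) ((t.length : Int) + 1) 1)
    = (dqRef (List.foldl stepRef [a0] t), (List.foldl stepRef [a0] t).headI) := by
  intro u
  induction u with
  | nil =>
    intro done R ht hR
    have hd : done = t := by simpa using ht.symm
    subst hd
    rw [PySem.List.pyRange_one_eq_nil (by omega)]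
    simp [hR]
  | cons x v ih =>
    intro done R ht hR
    have hRne : R ≠ [] := by
      rw [hR]; exact refFold_ne_nil [a0] done (by simp)
    have hlen : R.length = done.length + 1 := by
      rw [hR, length_refFold]; simp; try omega
    have hlt : ((done.length : Int) + 1) < (t.length : Int) + 1 := by
      subst ht; simp; try omega
    rw [PySem.List.pyRange_one_cons hlt, List.foldl_cons]
    have hi : ((done.length : Int) + 1) = ((R.length : Int)) := by
      rw [hlen]; push_cast; ring
    have hAx : PySem.List.pyGetD (a0 :: t) ((done.length : Int) + 1) 0 = x := by
      have e1 : ((done.length : Int) + 1) = (((a0 :: done).length : Nat) : Int) := by simp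
      have e2 : a0 :: t = (a0 :: done) ++ x :: v := by rw [ht]; rfl
      rw [e1, e2, PySem.List.pyGetD_natCast]
      simp [List.getD_eq_getElem?_getD]
    dsimp only
    rw [hi] at hAx
    rw [hi]
    rw [hAx]
    rw [bstep_eq R hRne x]
    have := ih (done ++ [x]) (stepRef R x)
      (by rw [ht]; simp)
      (by rw [List.foldl_append, ← hR]; rfl)
    have estart : ((R.length : Int)) + 1 = (((done ++ [x]).length : Int) + 1) := by
      simp only [List.length_append, List.length_cons, List.length_nil]
      omega
    rw [estart]
    exact this

-- ===== VERDICT (by name: the statement is the Claim_ definition above) =====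
theorem solution_spec : Claim_equal_solution := by
  unfold Claim_equal_solution
  rintro ⟨⟩ hD hP
  · exact absurd rfl hP
  case cons a0 t =>
    unfold Spec_solution solution solution_alt
    obtain ⟨r, rs, hRfin⟩ : ∃ r rs, List.foldl stepRef [a0] t = r :: rs := by
      rcases hE : List.foldl stepRef [a0] t with _ | ⟨r, rs⟩
      · exact absurd hE (refFold_ne_nil [a0] t (by simp))
      · exact ⟨r, rs, rfl⟩
    have einit : List.replicate (a0 :: t).length a0
        = ([a0] : List Int).reverse ++ List.replicate t.length a0 := by
      simp [List.replicate_succ]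
    have erange : PySem.List.pyRange 1 (((a0 :: t).length : Int)) 1
        = PySem.List.pyRange ((([] : List Int).length : Int) + 1) ((t.length : Int) + 1) 1 := by
      norm_num
    have hAside := A_inv a0 t t [] [a0] (by simp) rfl
    have hBside := B_inv a0 t t [] [a0] (by simp) rfl
    have einitSt : (([(0, a0)], a0) : List (Int × Int) × Int)
        = (dqRef [a0], List.headI [a0]) := by
      norm_num [dqRef, annot, rise, riseFrom, List.headI]
    simp only [PySem.List.pyGetD_zero_cons, einit, erange, einitSt]
    rw [hAside, hBside, hRfin]
    rw [show ((r :: rs).reverse) = rs.reverse ++ [r] from by simp,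
        PySem.List.pyGetD_neg_one_append_singleton]
    rfl
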